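-- pv_equiv track=rewrite | github.com/chen-squared/nnmoduletools | nnmoduletools/comparer/compare_visualizer.py | rearrange_middle_first
-- ===== SOURCE A (Python) =====
-- def rearrange_middle_first(arr):
--     result = []
--     i, j = 0, len(arr) - 1
--     while i <= j:
--         result.append(arr[i])
--         if i != j:
--             result.append(arr[j])
--         i += 1
--         j -= 1
--     return result
-- ===== SOURCE B (Python) =====
-- def rearrange_middle_first(arr):
--     h = (len(arr) + 1) // 2
--     front = arr[:h]
--     back = arr[h:][::-1]
--     out = []
--     for a, b in zip(front, back):
--         out += [a, b]
--     if len(back) < len(front):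
--         out.append(front[-1])
--     return out
-- ===== Notes on version B (the rewrite author's own statement) =====
-- stated objective: alternative
-- what changed: Replaces the two-pointer inward while-loop with a precompute-halves decomposition: split the list into the front half and the reversed back half via slicing, interleave them with zip, and append the leftover middle element once for odd lengths.
import Mathlib
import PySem

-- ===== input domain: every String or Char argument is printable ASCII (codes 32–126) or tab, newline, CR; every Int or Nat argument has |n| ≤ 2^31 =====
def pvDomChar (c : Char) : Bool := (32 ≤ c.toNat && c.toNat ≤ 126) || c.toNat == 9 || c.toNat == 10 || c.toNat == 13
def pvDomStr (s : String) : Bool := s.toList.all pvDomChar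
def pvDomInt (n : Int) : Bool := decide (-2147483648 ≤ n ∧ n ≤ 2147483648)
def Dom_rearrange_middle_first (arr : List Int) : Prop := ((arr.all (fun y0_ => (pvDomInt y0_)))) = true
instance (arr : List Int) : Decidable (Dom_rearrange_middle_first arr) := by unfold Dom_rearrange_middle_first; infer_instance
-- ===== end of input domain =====

-- B replaces A's two-pointer inward while-loop by splitting the list into the front half and the
-- reversed back half and interleaving them (alternative decomposition, same O(n) cost).


-- ===== PORT A =====
-- the while-loop: i walks in from the left, j from the right; arr[i]/arr[j] are always in
-- range when the loop body runs (0 ≤ i ≤ j < len), so pyGetD's default is never consulted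
def loopA (arr : List Int) (i j : Int) : List Int :=
  if i ≤ j then
    (PySem.List.pyGetD arr i 0 ::
      (if i ≠ j then [PySem.List.pyGetD arr j 0] else [])) ++ loopA arr (i + 1) (j - 1)
  else []
termination_by (j + 1 - i).toNat
decreasing_by omega

def rearrange_middle_first (arr : List Int) : List Int :=
  loopA arr 0 ((arr.length : Int) - 1)

-- ===== PORT B =====
def rearrange_middle_first_alt (arr : List Int) : List Int :=
  let h : Int := PySem.Int.floordiv ((arr.length : Int) + 1) 2
  let front := PySem.List.slice arr none (some h)
  let back := (PySem.List.slice arr (some h) none).reverse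
  let out := (front.zip back).foldl (fun acc p => acc ++ [p.1, p.2]) []
  if back.length < front.length then out ++ [PySem.List.pyGetD front (-1) 0] else out

-- ===== PRECONDITION & SPEC =====
def Spec_rearrange_middle_first (arr : List Int) (out : List Int) : Prop := out = rearrange_middle_first_alt arr
instance (arr : List Int) (out : List Int) : Decidable (Spec_rearrange_middle_first arr out) := by unfold Spec_rearrange_middle_first; infer_instance

-- ===== CLAIM (what is proved, stated in full; the proofs are below) =====
def Claim_equal_rearrange_middle_first : Prop := ∀ (arr : List Int), Dom_rearrange_middle_first arr → Spec_rearrange_middle_first arr (rearrange_middle_first arr)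

-- ===== LEMMAS AND PROOFS =====

-- B in closed take/drop form, given the value of the floor-division
lemma B_closed (arr : List Int) (h' : Nat)
    (hh : PySem.Int.floordiv ((arr.length : Int) + 1) 2 = (h' : Int)) (hle : h' ≤ arr.length) :
    rearrange_middle_first_alt arr =
      (if arr.length - h' < h' then
        ((arr.take h').zip (arr.drop h').reverse).flatMap (fun p => [p.1, p.2])
          ++ [PySem.List.pyGetD (arr.take h') (-1) 0]
      else ((arr.take h').zip (arr.drop h').reverse).flatMap (fun p => [p.1, p.2])) := by
  simp only [rearrange_middle_first_alt, hh, PySem.List.slice_to_natCast,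
    PySem.List.slice_from_natCast, PySem.List.foldl_append_eq_flatMap, List.nil_append,
    List.length_reverse, List.length_drop, List.length_take]
  congr 1
  simp [Nat.min_eq_left hle]

-- the floor-division (n + 1) // 2 as a Nat
lemma floordiv_succ_two (n : Nat) :
    PySem.Int.floordiv ((n : Int) + 1) 2 = (((n + 1) / 2 : Nat) : Int) := by
  have e : (n : Int) + 1 = ((n + 1 : Nat) : Int) := by push_cast; ring
  rw [e]
  exact_mod_cast PySem.Int.floordiv_natCast (n + 1) 2

-- B's one-round recurrence on a list with both ends exposed
lemma B_rec (x y : Int) (mid : List Int) :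
    rearrange_middle_first_alt (x :: mid ++ [y]) = x :: y :: rearrange_middle_first_alt mid := by
  have hm' : (mid.length + 1) / 2 ≤ mid.length := by omega
  have hlen : (x :: mid ++ [y]).length = mid.length + 2 := by simp
  have hbig : PySem.Int.floordiv (((x :: mid ++ [y]).length : Int) + 1) 2
      = (((mid.length + 1) / 2 + 1 : Nat) : Int) := by
    rw [hlen, floordiv_succ_two (mid.length + 2)]
    congr 1
    omega
  rw [B_closed (x :: mid ++ [y]) ((mid.length + 1) / 2 + 1) hbig (by rw [hlen]; omega),
    B_closed mid ((mid.length + 1) / 2) (floordiv_succ_two mid.length) hm']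
  have htake : (x :: mid ++ [y]).take ((mid.length + 1) / 2 + 1)
      = x :: mid.take ((mid.length + 1) / 2) := by
    simp [List.take_append_of_le_length hm']
  have hdrop : ((x :: mid ++ [y]).drop ((mid.length + 1) / 2 + 1)).reverse
      = y :: (mid.drop ((mid.length + 1) / 2)).reverse := by
    simp [List.drop_append_of_le_length hm']
  rw [htake, hdrop, hlen]
  have hcond : (mid.length + 2 - ((mid.length + 1) / 2 + 1) < (mid.length + 1) / 2 + 1)
      ↔ (mid.length - (mid.length + 1) / 2 < (mid.length + 1) / 2) := by omega
  by_cases hc : mid.length - (mid.length + 1) / 2 < (mid.length + 1) / 2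
  · have h1 : 1 ≤ (mid.length + 1) / 2 := by omega
    have htne : mid.take ((mid.length + 1) / 2) ≠ [] := by
      have : (mid.take ((mid.length + 1) / 2)).length = (mid.length + 1) / 2 := by
        simp [Nat.min_eq_left hm']
      intro hnil
      rw [hnil] at this
      simp at this
      omega
    rw [if_pos (hcond.mpr hc), if_pos hc]
    rw [PySem.List.pyGetD_neg_one _ _ (by simp), PySem.List.pyGetD_neg_one _ _ htne,
      List.getLast_cons htne]
    simp [List.zip_cons_cons]
  · rw [if_neg (fun h => hc (hcond.mp h)), if_neg hc]
    simp [List.zip_cons_cons]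

-- shift lemma: A's loop over x :: mid ++ [y] at indices i+1 .. j+1 only reads mid
lemma loopA_shift (x y : Int) (mid : List Int) :
    ∀ (i j : Int), 0 ≤ i → j ≤ (mid.length : Int) - 1 →
      loopA (x :: mid ++ [y]) (i + 1) (j + 1) = loopA mid i j := by
  intro i j
  induction hn : (j + 1 - i).toNat using Nat.strong_induction_on generalizing i j with
  | _ n ih =>
    intro hi hj
    have hget : ∀ k : Int, 0 ≤ k → k < (mid.length : Int) →
        PySem.List.pyGetD (x :: (mid ++ [y])) (k + 1) 0 = PySem.List.pyGetD mid k 0 := by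
      intro k hk hk'
      rw [PySem.List.pyGetD_eq_getElem _ _ (by omega) (by simp; omega),
        PySem.List.pyGetD_eq_getElem _ _ hk (by omega)]
      have h1 : (k + 1).toNat = k.toNat + 1 := by omega
      have h2 : k.toNat < mid.length := by omega
      simp [h1, List.getElem_cons_succ, List.getElem_append_left, h2]
    by_cases hij : i ≤ j
    · conv_lhs => rw [loopA]
      conv_rhs => rw [loopA]
      rw [if_pos (show i + 1 ≤ j + 1 by omega), if_pos hij]
      have e1 : j + 1 - 1 = j - 1 + 1 := by ring
      rw [e1, ih ((j - 1) + 1 - (i + 1)).toNat (by omega) (i + 1) (j - 1) rfl (by omega)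
        (by omega)]
      have hgi : PySem.List.pyGetD (x :: (mid ++ [y])) (i + 1) 0 = PySem.List.pyGetD mid i 0 :=
        hget i hi (by omega)
      have hgj : PySem.List.pyGetD (x :: (mid ++ [y])) (j + 1) 0 = PySem.List.pyGetD mid j 0 :=
        hget j (by omega) (by omega)
      by_cases hxy : i = j
      · simp [hxy, hgj]
      · simp [hxy, show i + 1 ≠ j + 1 by omega, hgi, hgj]
    · conv_lhs => rw [loopA]
      conv_rhs => rw [loopA]
      rw [if_neg (show ¬ i + 1 ≤ j + 1 by omega), if_neg hij]

-- A's one-round recurrence on a list with both ends exposed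
lemma A_rec (x y : Int) (mid : List Int) :
    rearrange_middle_first (x :: mid ++ [y]) = x :: y :: rearrange_middle_first mid := by
  unfold rearrange_middle_first
  have hlen : (((x :: mid ++ [y]).length : Int)) - 1 = (mid.length : Int) + 1 := by
    have h2 : (x :: mid ++ [y]).length = mid.length + 2 := by simp
    rw [h2]; push_cast; ring
  rw [hlen]
  conv_lhs => rw [loopA]
  rw [if_pos (show (0 : Int) ≤ (mid.length : Int) + 1 by omega),
    if_pos (show (0 : Int) ≠ (mid.length : Int) + 1 by omega)]
  simp only [List.cons_append]
  have hx : PySem.List.pyGetD (x :: (mid ++ [y])) 0 0 = x := PySem.List.pyGetD_zero_cons ..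
  have hy : PySem.List.pyGetD (x :: (mid ++ [y])) ((mid.length : Int) + 1) 0 = y := by
    rw [PySem.List.pyGetD_eq_getElem _ _ (by omega) (by simp)]
    have h1 : ((mid.length : Int) + 1).toNat = mid.length + 1 := by omega
    simp [h1, List.getElem_cons_succ]
  have hshift := loopA_shift x y mid 0 ((mid.length : Int) - 1) le_rfl (by omega)
  have e1 : (mid.length : Int) - 1 + 1 = (mid.length : Int) + 1 - 1 := by ring
  rw [e1] at hshift
  simp only [List.cons_append] at hshift
  rw [hx, hy, show (0 : Int) + 1 = 0 + 1 from rfl, hshift]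
  simp
-- main equality by strong induction on length, peeling both ends at once
lemma main_eq : ∀ (n : Nat) (arr : List Int), arr.length = n →
    rearrange_middle_first arr = rearrange_middle_first_alt arr := by
  intro n
  induction n using Nat.strong_induction_on with
  | _ n ih =>
    intro arr hlen
    match arr with
    | [] =>
        rw [rearrange_middle_first, B_closed [] 0 (by simp)
          (by simp), loopA]
        norm_num
    | [x] =>
        rw [rearrange_middle_first, B_closed [x] 1 (by simp)
          (by simp), show ((([x] : List Int).length : Int) - 1) = 0 by simp, loopA, loopA]
        norm_num [PySem.List.pyGetD_zero_cons, PySem.List.pyGetD_neg_one [x] 0 (by simp)]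
    | x :: z :: rest =>
        obtain ⟨mid, y, hmy⟩ := (z :: rest).eq_nil_or_concat.resolve_left (by simp)
        rw [List.concat_eq_append] at hmy
        have hlm : mid.length + 2 = n := by
          have h2 := congrArg List.length hmy
          simp at h2 hlen
          omega
        rw [hmy, show x :: (mid ++ [y]) = x :: mid ++ [y] from rfl, A_rec, B_rec,
          ih mid.length (by omega) mid rfl]

-- ===== VERDICT (by name: the statement is the Claim_ definition above) =====
theorem rearrange_middle_first_spec : Claim_equal_rearrange_middle_first := by
  intro arr _
  unfold Spec_rearrange_middle_first
  exact main_eq arr.length arr rfl
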